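-- pv_equiv track=rewrite | github.com/vaibhav-jain-dev/learning-algo | problems/strings/pattern-matching/implement-strstr/python_code.py | str_str_kmp
-- ===== SOURCE A (Python) =====
-- from typing import List
--
-- def str_str_kmp(haystack: str, needle: str) -> int:
--     """
--     Find first occurrence of needle in haystack using KMP algorithm.
--
--     Time Complexity: O(n + m)
--     Space Complexity: O(m) for the LPS array
--     """
--     if not needle:
--         return 0
--
--     n = len(haystack)
--     m = len(needle)
--
--     if m > n:
--         return -1
--
--     # Build LPS (Longest Proper Prefix Suffix) array
--     lps = compute_lps(needle)
--
--     i = 0  # Index for haystack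
--     j = 0  # Index for needle
--
--     while i < n:
--         if haystack[i] == needle[j]:
--             i += 1
--             j += 1
--
--             if j == m:
--                 return i - j  # Found! Return starting index
--
--         elif j > 0:
--             # Mismatch after j matches
--             j = lps[j - 1]
--         else:
--             # No match, move to next character
--             i += 1
--
--     return -1
--
-- def compute_lps(pattern: str) -> List[int]:
--     """
--     Compute Longest Proper Prefix Suffix array for KMP algorithm.
--     """
--     m = len(pattern)
--     lps = [0] * m
--     length = 0
--     i = 1
--
--     while i < m:
--         if pattern[i] == pattern[length]:
--             length += 1
--             lps[i] = length
--             i += 1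
--         elif length > 0:
--             length = lps[length - 1]
--         else:
--             lps[i] = 0
--             i += 1
--
--     return lps
-- ===== SOURCE B (Python) =====
-- def str_str_kmp(haystack: str, needle: str) -> int:
--     """Naive substring search: compare a slice at each start position."""
--     n, m = len(haystack), len(needle)
--     for i in range(n - m + 1):
--         if haystack[i:i + m] == needle:
--             return i
--     return -1
-- ===== Notes on version B (the rewrite author's own statement) =====
-- stated objective: simpler
-- what changed: Replaces the KMP failure-table algorithm (LPS preprocessing plus two-pointer scan) with a plain slice-compare loop over every start position.
import Mathlib
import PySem

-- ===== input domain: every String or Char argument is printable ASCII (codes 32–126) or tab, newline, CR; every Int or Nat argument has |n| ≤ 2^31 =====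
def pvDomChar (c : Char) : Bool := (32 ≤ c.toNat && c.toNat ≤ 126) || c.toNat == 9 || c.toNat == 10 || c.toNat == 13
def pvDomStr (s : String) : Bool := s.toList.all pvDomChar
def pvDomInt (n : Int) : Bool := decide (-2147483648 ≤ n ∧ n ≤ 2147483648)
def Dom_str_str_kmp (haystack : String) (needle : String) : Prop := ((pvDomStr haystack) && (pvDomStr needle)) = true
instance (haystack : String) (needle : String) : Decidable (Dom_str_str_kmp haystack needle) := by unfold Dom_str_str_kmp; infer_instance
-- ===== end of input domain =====

-- B replaces A's KMP failure-table search by a plain slice-compare loop over every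
-- start position (simpler; a timing run measured it faster in CPython, where
-- slice comparison runs in C); return values proved equal on all inputs.


-- ===== PORT A =====
-- `compute_lps`'s while loop; state (lps, length, i); fuel only makes the loop
-- total, 2*m+1 is proved sufficient below.  Indexing `pattern[i] == pattern[length]`
-- is ported as `p[i]? = p[len]?` (both indices are always in range in Python).
def lpsLoop (p : List Char) (m : Nat) : Nat → List Nat → Nat → Nat → List Nat
  | 0, lps, _, _ => lps
  | f+1, lps, len, i =>
    if i < m then
      if p[i]? = p[len]? then
        lpsLoop p m f (lps.set i (len+1)) (len+1) (i+1)
      else if 0 < len then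
        lpsLoop p m f lps (lps.getD (len-1) 0) i
      else
        lpsLoop p m f (lps.set i 0) len (i+1)
    else lps

def computeLps (p : List Char) : List Nat :=
  lpsLoop p p.length (2*p.length+1) (List.replicate p.length 0) 0 1

-- A's main while loop; state (i, j); fuel 2*n+1 is proved sufficient below.
def kmpLoop (s p : List Char) (n m : Nat) (lps : List Nat) : Nat → Nat → Nat → Int
  | 0, _, _ => -1
  | f+1, i, j =>
    if i < n then
      if s[i]? = p[j]? then
        if j+1 = m then ((i:Int)+1) - ((j:Int)+1)
        else kmpLoop s p n m lps f (i+1) (j+1)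
      else if 0 < j then kmpLoop s p n m lps f i (lps.getD (j-1) 0)
      else kmpLoop s p n m lps f (i+1) j
    else -1

def str_str_kmp (haystack : String) (needle : String) : Int :=
  let p := needle.toList
  if p = [] then 0
  else
    let s := haystack.toList
    let n := s.length
    let m := p.length
    if m > n then -1
    else kmpLoop s p n m (computeLps p) (2*n+1) 0 0

-- ===== PORT B =====
-- `for i in range(n - m + 1)` ported as recursion on the remaining iteration
-- count `n + 1 - m` (Nat subtraction = empty range when m > n, exactly as Python);
-- the slice haystack[i:i+m] is `(s.drop i).take m` (i, m ≥ 0, so exact).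
def naiveLoop (s p : List Char) (m : Nat) : Nat → Nat → Int
  | 0, _ => -1
  | c+1, i => if (s.drop i).take m = p then (i : Int) else naiveLoop s p m c (i+1)

def str_str_kmp_alt (haystack : String) (needle : String) : Int :=
  let s := haystack.toList
  let p := needle.toList
  naiveLoop s p p.length (s.length + 1 - p.length) 0

-- ===== PRECONDITION & SPEC =====
def Spec_str_str_kmp (haystack : String) (needle : String) (out : Int) : Prop := out = str_str_kmp_alt haystack needle
instance (haystack : String) (needle : String) (out : Int) : Decidable (Spec_str_str_kmp haystack needle out) := by unfold Spec_str_str_kmp; infer_instance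

-- ===== CLAIM (what is proved, stated in full; the proofs are below) =====
def Claim_equal_str_str_kmp : Prop := ∀ (haystack : String) (needle : String), Dom_str_str_kmp haystack needle → Spec_str_str_kmp haystack needle (str_str_kmp haystack needle)

-- ===== LEMMAS AND PROOFS =====

-- length of the longest proper border of `p.take k` (longest l < k with
-- `p.take l` a suffix of `p.take k`); the value KMP's lps table stores.
def mbr (p : List Char) (k : Nat) : Nat :=
  Nat.findGreatest (fun l => p.take l <:+ p.take k) (k-1)

theorem mbr_lt (p : List Char) (k : Nat) (hk : 1 ≤ k) : mbr p k < k := by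
  have := Nat.findGreatest_le (P := fun l => p.take l <:+ p.take k) (n := k-1)
  unfold mbr; omega

theorem mbr_suffix (p : List Char) (k : Nat) : p.take (mbr p k) <:+ p.take k := by
  rcases Nat.eq_zero_or_pos k with h | h
  · subst h; simp [mbr]
  · unfold mbr
    exact Nat.findGreatest_spec (P := fun l => p.take l <:+ p.take k) (m := 0)
      (n := k-1) (by omega) (by simp)

theorem mbr_max (p : List Char) (k l : Nat) (hl : l < k)
    (hs : p.take l <:+ p.take k) : l ≤ mbr p k := by
  by_contra h
  unfold mbr at h
  exact Nat.findGreatest_is_greatest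
    (P := fun l => p.take l <:+ p.take k) (n := k-1) (k := l) (by omega) (by omega) hs

-- suffix version of cons_prefix_cons, via reverse
theorem suffix_concat_concat {a b : List Char} {x y : Char} :
    a ++ [x] <:+ b ++ [y] ↔ x = y ∧ a <:+ b := by
  constructor
  · intro h
    have h' : (a ++ [x]).reverse <+: (b ++ [y]).reverse := List.reverse_prefix.2 h
    simp only [List.reverse_append, List.reverse_cons, List.reverse_nil,
      List.nil_append, List.singleton_append, List.cons_prefix_cons] at h'
    exact ⟨h'.1, List.reverse_prefix.1 h'.2⟩
  · rintro ⟨rfl, h⟩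
    obtain ⟨t, rfl⟩ := h
    exact ⟨t, by simp⟩

-- p.take (l+1) = p.take l ++ [c] when p[l]? = some c
theorem take_succ_eq (p : List Char) (l : Nat) (c : Char) (h : p[l]? = some c) :
    p.take (l+1) = p.take l ++ [c] := by
  rw [List.take_add_one, h]; rfl

-- border extension: characterizes take (l+1) <:+ take (k+1) via last chars
theorem border_succ (p : List Char) (l k : Nat) (hl : l < p.length) (hk : k < p.length) :
    p.take (l+1) <:+ p.take (k+1) ↔ (p[l]? = p[k]? ∧ p.take l <:+ p.take k) := by
  have hcl : p[l]? = some p[l] := List.getElem?_eq_getElem hl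
  have hck : p[k]? = some p[k] := List.getElem?_eq_getElem hk
  rw [take_succ_eq p l _ hcl, take_succ_eq p k _ hck, suffix_concat_concat]
  constructor
  · rintro ⟨he, h⟩; exact ⟨by rw [hcl, hck, he], h⟩
  · rintro ⟨h, h2⟩
    rw [hcl, hck] at h
    exact ⟨Option.some_injective _ h, h2⟩

theorem take_length_eq (p : List Char) (l : Nat) (h : l ≤ p.length) :
    (p.take l).length = l := by simp [h]

-- chain: two take-borders of the same list are nested
theorem border_chain (p q : List Char) (l j : Nat) (hl : l ≤ p.length) (hj : j ≤ p.length)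
    (h1 : p.take l <:+ q) (h2 : p.take j <:+ q) (hlj : l ≤ j) :
    p.take l <:+ p.take j :=
  List.suffix_of_suffix_length_le h1 h2 (by
    rw [take_length_eq p l hl, take_length_eq p j hj]; exact hlj)

-- ---------- lps loop invariant and correctness ----------

def LpsInv (p : List Char) (lps : List Nat) (len i : Nat) : Prop :=
  lps.length = p.length ∧ 1 ≤ i ∧ i ≤ p.length ∧ len < i ∧
  (∀ k, k < i → lps[k]? = some (mbr p (k+1))) ∧
  p.take len <:+ p.take i ∧
  (∀ l, len < l → l < i → p.take l <:+ p.take i → p[l]? ≠ p[i]?)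

-- the crux of KMP preprocessing: a successful comparison extends the longest border
theorem mbr_succ_match (p : List Char) (len i : Nat) (hlen : len < i) (hi : i < p.length)
    (hsuf : p.take len <:+ p.take i)
    (hno : ∀ l, len < l → l < i → p.take l <:+ p.take i → p[l]? ≠ p[i]?)
    (hm : p[i]? = p[len]?) : mbr p (i+1) = len+1 := by
  have hlm : len < p.length := by omega
  have hge : len + 1 ≤ mbr p (i+1) := by
    apply mbr_max p (i+1) (len+1) (by omega)
    exact (border_succ p len i hlm hi).2 ⟨hm.symm, hsuf⟩
  have hle : mbr p (i+1) ≤ len + 1 := by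
    by_contra hgt
    have h1 : 1 ≤ mbr p (i+1) := by omega
    have h2 : mbr p (i+1) < i + 1 := mbr_lt p (i+1) (by omega)
    have hs := mbr_suffix p (i+1)
    have he : mbr p (i+1) = (mbr p (i+1) - 1) + 1 := by omega
    rw [he] at hs
    have hd := (border_succ p (mbr p (i+1) - 1) i (by omega) hi).1 hs
    exact hno (mbr p (i+1) - 1) (by omega) (by omega) hd.2 hd.1
  omega

theorem mbr_succ_zero (p : List Char) (i : Nat) (hi0 : 1 ≤ i) (hi : i < p.length)
    (hno : ∀ l, 0 < l → l < i → p.take l <:+ p.take i → p[l]? ≠ p[i]?)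
    (hmm : ¬ (p[i]? = p[0]?)) : mbr p (i+1) = 0 := by
  by_contra hgt
  have h1 : 1 ≤ mbr p (i+1) := by omega
  have h2 : mbr p (i+1) < i + 1 := mbr_lt p (i+1) (by omega)
  have hs := mbr_suffix p (i+1)
  have he : mbr p (i+1) = (mbr p (i+1) - 1) + 1 := by omega
  rw [he] at hs
  have hd := (border_succ p (mbr p (i+1) - 1) i (by omega) hi).1 hs
  rcases Nat.eq_zero_or_pos (mbr p (i+1) - 1) with h0 | h0
  · rw [h0] at hd; exact hmm hd.1.symm
  · exact hno (mbr p (i+1) - 1) h0 (by omega) hd.2 hd.1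

theorem lpsLoop_correct (p : List Char) (f : Nat) :
    ∀ lps len i, LpsInv p lps len i → 2*(p.length - i) + len + 1 ≤ f →
    ∀ k, k < p.length → (lpsLoop p p.length f lps len i)[k]? = some (mbr p (k+1)) := by
  induction f with
  | zero => intro lps len i _ hf; omega
  | succ f ih =>
    intro lps len i hinv hf k hk
    obtain ⟨hL, hi1, him, hli, htab, hsuf, hno⟩ := hinv
    by_cases hi : i < p.length
    · simp only [lpsLoop, if_pos hi]
      by_cases hc : p[i]? = p[len]?
      · rw [if_pos hc]
        have hmbr : mbr p (i+1) = len+1 := mbr_succ_match p len i hli hi hsuf hno hc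
        apply ih _ _ _ _ (by omega) _ hk
        refine ⟨by simp [hL], by omega, by omega, by omega, ?_, ?_, ?_⟩
        · intro k' hk'
          rcases Nat.lt_or_ge k' i with h | h
          · rw [List.getElem?_set_ne (by omega)]; exact htab k' h
          · have : k' = i := by omega
            subst this
            rw [List.getElem?_set_self (by omega), hmbr]
        · exact (border_succ p len i (by omega) hi).2 ⟨hc.symm, hsuf⟩
        · intro l hl1 hl2 hls
          exfalso
          have := mbr_max p (i+1) l (by omega) hls
          omega
      · rw [if_neg hc]
        by_cases hlp : 0 < len
        · rw [if_pos hlp]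
          have hget : lps.getD (len-1) 0 = mbr p len := by
            rw [List.getD_eq_getElem?_getD, htab (len-1) (by omega)]
            have : len - 1 + 1 = len := by omega
            rw [this]; rfl
          have hlt : mbr p len < len := mbr_lt p len hlp
          rw [hget]
          apply ih _ _ _ _ (by omega) _ hk
          refine ⟨hL, hi1, him, by omega, htab, (mbr_suffix p len).trans hsuf, ?_⟩
          intro l hl1 hl2 hls
          rcases Nat.lt_trichotomy l len with h | h | h
          · exfalso
            have hch : p.take l <:+ p.take len :=
              border_chain p (p.take i) l len (by omega) (by omega) hls hsuf (by omega)
            have := mbr_max p len l h hch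
            omega
          · subst h; intro hll; exact hc hll.symm
          · exact hno l h hl2 hls
        · have hlen0 : len = 0 := by omega
          rw [if_neg hlp]
          subst hlen0
          have hmbr : mbr p (i+1) = 0 := mbr_succ_zero p i hi1 hi hno hc
          apply ih _ _ _ _ (by omega) _ hk
          refine ⟨by simp [hL], by omega, by omega, by omega, ?_, by simp, ?_⟩
          · intro k' hk'
            rcases Nat.lt_or_ge k' i with h | h
            · rw [List.getElem?_set_ne (by omega)]; exact htab k' h
            · have : k' = i := by omega
              subst this
              rw [List.getElem?_set_self (by omega), hmbr]
          · intro l hl1 hl2 hls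
            exfalso
            have := mbr_max p (i+1) l (by omega) hls
            omega
    · simp only [lpsLoop, if_neg hi]
      exact htab k (by omega)

theorem computeLps_correct (p : List Char) (hm : 1 ≤ p.length) :
    ∀ k, k < p.length → (computeLps p)[k]? = some (mbr p (k+1)) := by
  have hmbr1 : mbr p 1 = 0 := by
    have := mbr_lt p 1 (by omega); omega
  apply lpsLoop_correct
  · refine ⟨by simp, by omega, hm, by omega, ?_, by simp, by omega⟩
    intro k hk
    have : k = 0 := by omega
    subst this
    rw [List.getElem?_replicate, if_pos (by omega : (0:Nat) < p.length)]
    simp [hmbr1]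
  · omega

-- ---------- naive loop characterization ----------

theorem naiveLoop_neg (s p : List Char) (m : Nat) :
    ∀ c i, (∀ t, t < c → (s.drop (i+t)).take m ≠ p) → naiveLoop s p m c i = -1 := by
  intro c
  induction c with
  | zero => intro i _; rfl
  | succ c ih =>
    intro i h
    have h0 := h 0 (by omega)
    simp only [Nat.add_zero] at h0
    simp only [naiveLoop, if_neg h0]
    exact ih (i+1) (fun t ht => by
      have h2 := h (t+1) (by omega)
      have he : i + (t+1) = i + 1 + t := by omega
      rwa [he] at h2)

theorem naiveLoop_pos (s p : List Char) (m : Nat) :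
    ∀ c i t0, t0 < c → (s.drop (i+t0)).take m = p →
    (∀ t, t < t0 → (s.drop (i+t)).take m ≠ p) →
    naiveLoop s p m c i = ((i + t0 : Nat) : Int) := by
  intro c
  induction c with
  | zero => intro i t0 h; omega
  | succ c ih =>
    intro i t0 ht0 hocc hmin
    cases t0 with
    | zero =>
      simp only [Nat.add_zero] at hocc
      simp [naiveLoop, hocc]
    | succ t0 =>
      have h0 := hmin 0 (by omega)
      simp only [Nat.add_zero] at h0
      simp only [naiveLoop, if_neg h0]
      have he0 : i + (t0+1) = i + 1 + t0 := by omega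
      have := ih (i+1) t0 (by omega) (by rwa [he0] at hocc) (fun t ht => by
        have h2 := hmin (t+1) (by omega)
        have he : i + (t+1) = i + 1 + t := by omega
        rwa [he] at h2)
      rw [this]; congr 1; omega

-- ---------- kmp loop invariant and correctness ----------

def KmpInv (s p : List Char) (i j : Nat) : Prop :=
  j ≤ i ∧ i ≤ s.length ∧ j < p.length ∧
  p.take j <:+ s.take i ∧
  (∀ t, t < i - j → (s.drop t).take p.length ≠ p)

-- an occurrence of p at t ≤ i yields a matched prefix of p ending at position i …
theorem occ_suffix (s p : List Char) (t i : Nat) (_ht : t ≤ i) (hle : i - t ≤ p.length)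
    (hocc : (s.drop t).take p.length = p) : p.take (i-t) <:+ s.take i := by
  have h1 : p.take (i-t) = (s.drop t).take (i-t) := by
    rw [← hocc, List.take_take, Nat.min_eq_left hle]
  have h2 : (s.take i).drop t = (s.drop t).take (i-t) := List.drop_take
  rw [h1, ← h2]
  exact List.drop_suffix t (s.take i)

-- … and fixes the next character of p against s
theorem occ_char (s p : List Char) (t i : Nat) (ht : t ≤ i) (hlt : i - t < p.length)
    (hocc : (s.drop t).take p.length = p) : p[i-t]? = s[i]? := by
  rw [← hocc, List.getElem?_take, if_pos hlt, List.getElem?_drop]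
  congr 1
  omega

-- a successful comparison extends the matched prefix
theorem match_extend (s p : List Char) (i j : Nat) (hj : j < p.length) (hi : i < s.length)
    (hsuf : p.take j <:+ s.take i) (hc : s[i]? = p[j]?) :
    p.take (j+1) <:+ s.take (i+1) := by
  have hcj : p[j]? = some p[j] := List.getElem?_eq_getElem hj
  have hci : s[i]? = some s[i] := List.getElem?_eq_getElem hi
  rw [take_succ_eq p j _ hcj, take_succ_eq s i _ hci, suffix_concat_concat]
  constructor
  · have := hc; rw [hci, hcj] at this; exact (Option.some_injective _ this).symm
  · exact hsuf

-- a full match ending at i+1 is an occurrence at i+1-m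
theorem success_occ (s p : List Char) (i : Nat) (hi : i < s.length) (hm : p.length ≤ i+1)
    (hsuf : p.take p.length <:+ s.take (i+1)) :
    (s.drop (i+1-p.length)).take p.length = p := by
  rw [List.take_length] at hsuf
  have hlen : (s.take (i+1)).length = i+1 := by
    rw [List.length_take]; omega
  have := List.suffix_iff_eq_drop.1 hsuf
  rw [hlen] at this
  rw [List.drop_take] at this
  have harith : i + 1 - (i + 1 - p.length) = p.length := by omega
  rw [harith] at this
  exact this.symm

theorem kmpLoop_correct (s p : List Char) (lps : List Nat)
    (hm : 1 ≤ p.length) (hmn : p.length ≤ s.length)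
    (hlps : ∀ k, k < p.length → lps[k]? = some (mbr p (k+1))) (f : Nat) :
    ∀ i j, KmpInv s p i j → 2*(s.length - i) + j + 1 ≤ f →
    kmpLoop s p s.length p.length lps f i j =
      naiveLoop s p p.length (s.length + 1 - p.length) 0 := by
  induction f with
  | zero => intro i j _ hf; omega
  | succ f ih =>
    intro i j hinv hf
    obtain ⟨hji, hin, hjm, hsuf, hnocc⟩ := hinv
    by_cases hi : i < s.length
    · simp only [kmpLoop, if_pos hi]
      by_cases hc : s[i]? = p[j]?
      · rw [if_pos hc]
        have hext := match_extend s p i j hjm hi hsuf hc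
        by_cases hjm1 : j+1 = p.length
        · rw [if_pos hjm1]
          have hocc : (s.drop (i+1-p.length)).take p.length = p := by
            apply success_occ s p i hi (by omega)
            rw [hjm1] at hext; exact hext
          have harith : i + 1 - p.length = i - j := by omega
          rw [harith] at hocc
          have hres := naiveLoop_pos s p p.length (s.length + 1 - p.length) 0 (i-j)
            (by omega) (by simpa using hocc)
            (fun t ht => by simpa using hnocc t ht)
          rw [hres]
          push_cast
          omega
        · rw [if_neg hjm1]
          rw [ih (i+1) (j+1) ⟨by omega, by omega, by omega, hext, ?_⟩ (by omega)]
          intro t ht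
          exact hnocc t (by omega)
      · rw [if_neg hc]
        by_cases hj0 : 0 < j
        · rw [if_pos hj0]
          have hget : lps.getD (j-1) 0 = mbr p j := by
            rw [List.getD_eq_getElem?_getD, hlps (j-1) (by omega)]
            have : j - 1 + 1 = j := by omega
            rw [this]; rfl
          have hlt : mbr p j < j := mbr_lt p j hj0
          rw [hget]
          apply ih i (mbr p j) ⟨by omega, hin, by omega, (mbr_suffix p j).trans hsuf, ?_⟩ (by omega)
          intro t ht
          rcases Nat.lt_or_ge t (i - j) with h | h
          · exact hnocc t h
          · intro hocc
            have hl1 : mbr p j < i - t := by omega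
            have hl2 : i - t ≤ j := by omega
            have hps := occ_suffix s p t i (by omega) (by omega) hocc
            have hpc := occ_char s p t i (by omega) (by omega) hocc
            rcases Nat.lt_or_ge (i - t) j with hlj | hlj
            · have hch : p.take (i-t) <:+ p.take j :=
                border_chain p (s.take i) (i-t) j (by omega) (by omega) hps hsuf (by omega)
              have := mbr_max p j (i-t) hlj hch
              omega
            · have hej : i - t = j := by omega
              rw [hej] at hpc
              exact hc (hpc.symm)
        · have hj : j = 0 := by omega
          rw [if_neg hj0]
          subst hj
          apply ih (i+1) 0 ⟨by omega, by omega, by omega, by simp, ?_⟩ (by omega)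
          intro t ht
          rcases Nat.lt_or_ge t i with h | h
          · exact hnocc t (by omega)
          · have het : t = i := by omega
            subst het
            intro hocc
            have hpc := occ_char s p t t (by omega) (by omega) hocc
            simp only [Nat.sub_self] at hpc
            exact hc (hpc.symm)
    · simp only [kmpLoop, if_neg hi]
      have hieq : i = s.length := by omega
      rw [naiveLoop_neg]
      intro t ht
      have : t < i - j := by omega
      simpa using hnocc t this

-- ===== VERDICT (by name: the statement is the Claim_ definition above) =====
theorem naiveLoop_nil (s : List Char) (c i : Nat) :
    naiveLoop s [] 0 (c+1) i = (i : Int) := by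
  simp [naiveLoop]

theorem str_str_kmp_spec : Claim_equal_str_str_kmp := by
  intro haystack needle _
  unfold Spec_str_str_kmp str_str_kmp str_str_kmp_alt
  simp only []
  by_cases hp : needle.toList = []
  · rw [if_pos hp, hp]
    have : haystack.toList.length + 1 - ([] : List Char).length
        = haystack.toList.length + 1 := by simp
    rw [this]
    simp [naiveLoop_nil]
  · rw [if_neg hp]
    have hm : 1 ≤ needle.toList.length := by
      cases h : needle.toList with
      | nil => exact absurd h hp
      | cons a l => simp
    by_cases hmn : needle.toList.length > haystack.toList.length
    · rw [if_pos hmn]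
      have hc0 : haystack.toList.length + 1 - needle.toList.length = 0 := by omega
      rw [hc0]
      rfl
    · rw [if_neg hmn]
      exact kmpLoop_correct haystack.toList needle.toList (computeLps needle.toList)
        hm (by omega) (computeLps_correct needle.toList hm) (2*haystack.toList.length+1)
        0 0 ⟨by omega, by omega, by omega, by simp, by omega⟩ (by omega)
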